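-- pv_equiv track=rewrite | github.com/MOONisYOUNG/algorithms-study | boj/no_9935_Explosion_of_String.py | solution
-- ===== SOURCE A (Python) =====
-- def solution(original_str: str, explosion_str: str) -> str:
--     stack = []
--     bomb_len = len(explosion_str)
--
--     for char in original_str:
--         stack.append(char)
--         if ''.join(stack[-bomb_len:]) == explosion_str:
--             for _ in range(bomb_len):
--                 stack.pop()
--
--     answer = ''
--     if not stack:
--         answer = "FRULA"
--     else:
--         answer = ''.join(stack)
--
--     return answer
-- ===== SOURCE B (Python) =====
-- def _step(w, fail, k, c):
--     # advance KMP state k by character c (fail[q] = longest proper border of w[:q+1])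
--     while k > 0 and w[k] != c:
--         k = fail[k - 1]
--     return k + 1 if w[k] == c else 0
--
--
-- def solution(original_str: str, explosion_str: str) -> str:
--     w = explosion_str
--     m = len(w)
--     if m == 0:
--         return original_str if original_str else "FRULA"
--     fail = [0] * m
--     k = 0
--     for q in range(1, m):
--         k = _step(w, fail, k, w[q])
--         fail[q] = k
--     stack = []  # (char, length of longest prefix of w that is a suffix of the stack here)
--     for c in original_str:
--         k = _step(w, fail, stack[-1][1] if stack else 0, c)
--         if k == m:
--             del stack[len(stack) - (m - 1):]
--         else:
--             stack.append((c, k))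
--     return ''.join(c for c, _ in stack) if stack else "FRULA"
-- ===== Notes on version B (the rewrite author's own statement) =====
-- stated objective: faster
-- what changed: B replaces A's per-character O(m) join-and-compare of the stack's top bomb_len characters by a stack of KMP automaton states (a precomputed failure table and one automaton step per character), so the scan is O(n) after an O(m^2) table build.
import Mathlib
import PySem

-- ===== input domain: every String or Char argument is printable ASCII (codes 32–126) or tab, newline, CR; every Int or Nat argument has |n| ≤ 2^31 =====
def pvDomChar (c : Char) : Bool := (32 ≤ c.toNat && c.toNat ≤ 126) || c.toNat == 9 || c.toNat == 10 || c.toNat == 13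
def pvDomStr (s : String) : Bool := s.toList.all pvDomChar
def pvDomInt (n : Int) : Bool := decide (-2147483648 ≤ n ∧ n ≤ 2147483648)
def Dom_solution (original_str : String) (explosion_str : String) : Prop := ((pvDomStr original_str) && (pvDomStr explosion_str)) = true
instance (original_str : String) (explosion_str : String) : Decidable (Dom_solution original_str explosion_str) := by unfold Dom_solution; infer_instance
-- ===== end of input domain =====

-- B replaces A's per-character suffix comparison by a stack of KMP match states
-- (one automaton step per character); the two stack processes are proved equal below.

-- ===== PORT A =====
-- loop body of A's `for char in original_str` (stack kept in push order; the
-- comparison ''.join(stack[-bomb_len:]) == explosion_str is list-of-chars equality)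
def aStep (w : List Char) (bombLen : Int) (st : List Char) (c : Char) : List Char :=
  let st' := st ++ [c]
  if PySem.List.slice st' (some (-bombLen)) none = w then
    (PySem.List.pyRange 0 bombLen 1).foldl (fun s _ => s.dropLast) st'  -- for _ in range(bomb_len): stack.pop()
  else st'

def solution (original_str : String) (explosion_str : String) : String :=
  let stack := original_str.toList.foldl (aStep explosion_str.toList (PySem.Str.len explosion_str)) []
  if stack = [] then "FRULA" else String.ofList stack

-- ===== PORT B =====
-- Source B's helper _step(w, fail, k, c): advance the KMP state k by character c.
-- The fuel argument only makes the while-loop total; at every call site fuel = k,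
-- which is never exhausted because the built table satisfies fail[j] < j+1.
def fbLoop (w : List Char) (fail : List Nat) (fuel k : Nat) (c : Char) : Nat :=
  match fuel with
  | 0 => if w[k]? = some c then k + 1 else 0
  | fuel + 1 =>
    if 0 < k ∧ w[k]? ≠ some c then fbLoop w fail fuel (fail[k-1]!) c
    else if w[k]? = some c then k + 1 else 0

-- Source B's table build: fail = [0]*m; k = 0; for q in range(1, m): k = _step(w, fail, k, w[q]); fail[q] = k
def buildFail (w : List Char) : List Nat × Nat :=
  (PySem.List.pyRange 1 (w.length : Int) 1).foldl
    (fun st q =>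
      let k := fbLoop w st.1 st.2 st.2 (PySem.List.pyGetD w q ' ')
      (PySem.List.pySetD st.1 q k, k))
    (List.replicate w.length 0, 0)

-- loop body of Source B's scan: stack of (char, match state)
def bStep (w : List Char) (tab : List Nat) (st : List (Char × Nat)) (c : Char) : List (Char × Nat) :=
  let k0 := match st.getLast? with | some x => x.2 | none => 0
  let k := fbLoop w tab k0 k0 c
  if k = w.length then st.take (st.length - (w.length - 1)) else st ++ [(c, k)]

def solution_alt (original_str : String) (explosion_str : String) : String :=
  let w := explosion_str.toList
  if w.length = 0 then (if original_str.toList.isEmpty then "FRULA" else original_str)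
  else
    let tab := (buildFail w).1
    let stack := original_str.toList.foldl (bStep w tab) []
    if stack = [] then "FRULA" else String.ofList (stack.map Prod.fst)

-- ===== PRECONDITION & SPEC =====
def Spec_solution (original_str : String) (explosion_str : String) (out : String) : Prop := out = solution_alt original_str explosion_str
instance (original_str : String) (explosion_str : String) (out : String) : Decidable (Spec_solution original_str explosion_str out) := by unfold Spec_solution; infer_instance

-- ===== CLAIM (what is proved, stated in full; the proofs are below) =====
def Claim_equal_solution : Prop := ∀ (original_str : String) (explosion_str : String), Dom_solution original_str explosion_str → Spec_solution original_str explosion_str (solution original_str explosion_str)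

-- ===== LEMMAS AND PROOFS =====

-- ——— A reference automaton (proof-only): the failure function as an argmax, and
-- the state transition as well-founded recursion over it ———

def failFn (w : List Char) (k : Nat) : Nat :=
  (((List.range k).reverse).find? (fun p => (w.take p).isSuffixOf (w.take k))).getD 0

theorem failFn_lt (w : List Char) (k : Nat) (hk : 0 < k) : failFn w k < k := by
  unfold failFn
  cases h : ((List.range k).reverse).find? (fun p => (w.take p).isSuffixOf (w.take k)) with
  | none => simpa using hk
  | some p =>
    have hp := List.mem_of_find?_eq_some h
    simp only [List.mem_reverse, List.mem_range] at hp
    simpa using hp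

def delta (w : List Char) (k : Nat) (c : Char) : Nat :=
  if h : 0 < k ∧ w[k]? ≠ some c then delta w (failFn w k) c
  else if w[k]? = some c then k + 1 else 0
termination_by k
decreasing_by exact failFn_lt w k h.1

-- longest p ≤ |w| such that w.take p is a suffix of t
def lps (w t : List Char) : Nat := Nat.findGreatest (fun p => (w.take p) <:+ t) w.length

theorem lps_le (w t : List Char) : lps w t ≤ w.length := Nat.findGreatest_le _

theorem lps_spec (w t : List Char) : (w.take (lps w t)) <:+ t :=
  Nat.findGreatest_spec (P := fun p => (w.take p) <:+ t) (Nat.zero_le _) (by simp)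

theorem le_lps (w t : List Char) (p : Nat) (hp : p ≤ w.length) (hs : (w.take p) <:+ t) :
    p ≤ lps w t := by
  by_contra hlt
  exact Nat.findGreatest_is_greatest (show lps w t < p by omega) hp hs

theorem lps_nil (w : List Char) (hw : w ≠ []) : lps w [] = 0 := by
  have h := lps_spec w []
  rw [List.suffix_nil] at h
  rcases List.take_eq_nil_iff.mp h with h | h
  · exact h
  · exact absurd h hw

theorem take_suffix_take (w T : List Char) (p q : Nat) (hpq : p ≤ q) (_hq : q ≤ w.length)
    (hp' : w.take p <:+ T) (hq' : w.take q <:+ T) : w.take p <:+ w.take q :=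
  List.suffix_of_suffix_length_le hp' hq' (by simp; omega)

theorem lps_take (w : List Char) (j : Nat) (hj : j ≤ w.length) : lps w (w.take j) = j := by
  refine Nat.le_antisymm ?_ (le_lps w _ j hj (List.suffix_refl _))
  have h := (lps_spec w (w.take j)).length_le
  simp only [List.length_take] at h
  have := lps_le w (w.take j)
  omega

theorem suffix_append_singleton_iff (u t : List Char) (x c : Char) :
    u ++ [x] <:+ t ++ [c] ↔ u <:+ t ∧ x = c := by
  rw [← List.reverse_prefix]
  simp only [List.reverse_append, List.reverse_cons, List.reverse_nil, List.nil_append,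
    List.singleton_append, List.cons_prefix_cons, List.reverse_prefix]
  tauto

theorem take_succ_suffix_append (w t : List Char) (c : Char) (p : Nat) (hp : p < w.length) :
    (w.take (p+1) <:+ t ++ [c]) ↔ (w.take p <:+ t ∧ w[p] = c) := by
  rw [List.take_add_one, List.getElem?_eq_getElem hp]
  exact suffix_append_singleton_iff (w.take p) t (w[p]) c

theorem lps_eq_length_iff (w t : List Char) : lps w t = w.length ↔ w <:+ t := by
  constructor
  · intro h
    have := lps_spec w t
    rwa [h, List.take_length] at this
  · intro h
    have h1 := le_lps w t w.length (Nat.le_refl _) (by simpa using h)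
    have h2 := lps_le w t
    omega

theorem lps_append_succ_elim (w t : List Char) (c : Char) (q : Nat)
    (h : lps w (t ++ [c]) = q + 1) :
    ∃ (hq : q < w.length), w.take q <:+ t ∧ w[q] = c := by
  have hle := lps_le w (t ++ [c])
  rw [h] at hle
  have hq : q < w.length := by omega
  have hs := lps_spec w (t ++ [c])
  rw [h] at hs
  exact ⟨hq, (take_succ_suffix_append w t c q hq).mp hs⟩

theorem find?_reverse_range_getD (P : Nat → Prop) [DecidablePred P] (hP0 : P 0) :
    ∀ n, (((List.range (n+1)).reverse).find? (fun p => decide (P p))).getD 0 = Nat.findGreatest P n := by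
  intro n
  induction n with
  | zero => simp [List.range_succ, hP0]
  | succ n ih =>
    rw [List.range_succ, List.reverse_append]
    simp only [List.reverse_cons, List.reverse_nil, List.nil_append, List.singleton_append,
      List.find?, Nat.findGreatest_succ]
    by_cases h : P (n+1)
    · simp [h]
    · simpa [h] using ih

theorem failFn_eq (w : List Char) (j : Nat) :
    failFn w (j+1) = Nat.findGreatest (fun p => (w.take p) <:+ (w.take (j+1))) j := by
  unfold failFn
  have hfun : (fun p => (w.take p).isSuffixOf (w.take (j+1)))
      = (fun p => decide ((w.take p) <:+ (w.take (j+1)))) := by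
    funext p
    rw [Bool.eq_iff_iff]
    simp [List.isSuffixOf_iff_suffix]
  rw [hfun, find?_reverse_range_getD _ (by simp)]

theorem failFn_suffix (w : List Char) (k : Nat) : w.take (failFn w k) <:+ w.take k := by
  cases k with
  | zero => simp [failFn]
  | succ j =>
    rw [failFn_eq]
    exact Nat.findGreatest_spec (P := fun p => (w.take p) <:+ (w.take (j+1))) (Nat.zero_le _) (by simp)

theorem le_failFn (w : List Char) (k p : Nat) (hpk : p < k) (hs : w.take p <:+ w.take k) :
    p ≤ failFn w k := by
  cases k with
  | zero => omega
  | succ j =>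
    rw [failFn_eq]
    by_contra hlt
    exact Nat.findGreatest_is_greatest (P := fun p => (w.take p) <:+ (w.take (j+1))) (n := j)
      (by omega) (by omega) hs

theorem delta_eq_lps (w : List Char) (_hw : w ≠ []) (c : Char) :
    ∀ k, k < w.length → ∀ t, lps w t = k → delta w k c = lps w (t ++ [c]) := by
  intro k
  induction k using Nat.strong_induction_on with
  | _ k ih =>
    intro hk t ht
    rw [delta]
    by_cases hc : w[k]? = some c
    · have hck : w[k] = c := by
        rw [List.getElem?_eq_getElem hk] at hc
        exact Option.some.inj hc
      simp only [hc, ne_eq, not_true_eq_false, and_false, dite_false, if_pos]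
      have htk : w.take k <:+ t := ht ▸ lps_spec w t
      have h1 : k + 1 ≤ lps w (t ++ [c]) :=
        le_lps w _ (k+1) (by omega) ((take_succ_suffix_append w t c k hk).mpr ⟨htk, hck⟩)
      have h2 : lps w (t ++ [c]) ≤ k + 1 := by
        cases h : lps w (t ++ [c]) with
        | zero => omega
        | succ q =>
          obtain ⟨hq, hsq, _⟩ := lps_append_succ_elim w t c q h
          have := le_lps w t q (by omega) hsq
          omega
      omega
    · by_cases hk0 : 0 < k
      · simp only [hk0, ne_eq, hc, not_false_eq_true, and_self, dite_true]
        have hk'k : failFn w k < k := failFn_lt w k hk0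
        have hk'm : failFn w k < w.length := lt_trans hk'k hk
        have htk : w.take k <:+ t := ht ▸ lps_spec w t
        have hrec := ih (failFn w k) hk'k hk'm (w.take (failFn w k)) (lps_take w _ (le_of_lt hk'm))
        rw [hrec]
        apply Nat.le_antisymm
        · cases h : lps w (w.take (failFn w k) ++ [c]) with
          | zero => exact Nat.zero_le _
          | succ q =>
            obtain ⟨hq, hsq, hcq⟩ := lps_append_succ_elim w _ c q h
            have h1 : w.take q <:+ t := (hsq.trans (failFn_suffix w k)).trans htk
            exact le_lps w _ (q+1) (by omega)
              ((take_succ_suffix_append w t c q hq).mpr ⟨h1, hcq⟩)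
        · cases h : lps w (t ++ [c]) with
          | zero => exact Nat.zero_le _
          | succ q =>
            obtain ⟨hq, hsq, hcq⟩ := lps_append_succ_elim w t c q h
            have hqk : q ≤ k := ht ▸ le_lps w t q (by omega) hsq
            have hqk' : q < k := by
              rcases Nat.lt_or_ge q k with h' | h'
              · exact h'
              · exfalso
                have hqe : q = k := by omega
                subst hqe
                rw [List.getElem?_eq_getElem hk] at hc
                exact hc (by rw [hcq])
            have hqtk : w.take q <:+ w.take k :=
              take_suffix_take w t q k (by omega) (by omega) hsq htk
            have hqf : q ≤ failFn w k := le_failFn w k q hqk' hqtk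
            have hqtk' : w.take q <:+ w.take (failFn w k) :=
              take_suffix_take w (w.take k) q (failFn w k) hqf (by omega) hqtk (failFn_suffix w k)
            exact le_lps w _ (q+1) (by omega)
              ((take_succ_suffix_append w _ c q hq).mpr ⟨hqtk', hcq⟩)
      · have hk0' : k = 0 := by omega
        subst hk0'
        simp only [lt_irrefl, false_and, dite_false, if_neg hc]
        cases h : lps w (t ++ [c]) with
        | zero => rfl
        | succ q =>
          obtain ⟨hq, hsq, hcq⟩ := lps_append_succ_elim w t c q h
          have hq0 : q ≤ 0 := ht ▸ le_lps w t q (by omega) hsq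
          have hq0' : q = 0 := by omega
          subst hq0'
          rw [List.getElem?_eq_getElem hq] at hc
          exact absurd (by rw [hcq]) hc

-- A's pop loop: bomb_len pops from the end
theorem foldl_dropLast_pyRange (m : Nat) (l : List Char) :
    (PySem.List.pyRange 0 (m : Int) 1).foldl (fun s _ => s.dropLast) l = l.take (l.length - m) := by
  induction m generalizing l with
  | zero => simp
  | succ m ih =>
    have : (m + 1 : Int) = ((m + 1 : Nat) : Int) := by omega
    rw [show ((m : Int) + 1) = (((m + 1 : Nat)) : Int) by omega] at *
    rw [PySem.List.pyRange_zero_natCast, List.range_succ]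
    rw [PySem.List.pyRange_zero_natCast] at ih
    simp only [List.map_append, List.foldl_append, List.map_cons, List.map_nil, List.foldl_cons,
      List.foldl_nil]
    rw [ih, List.dropLast_eq_take, List.take_take, List.length_take]
    congr 1
    omega

-- A's pop condition is "explosion is a suffix of the stack"
theorem slice_cond_iff_suffix (st' w : List Char) (hm : 0 < w.length) :
    PySem.List.slice st' (some (-(w.length : Int))) none = w ↔ w <:+ st' := by
  rw [PySem.List.slice_from_neg_natCast st' w.length hm]
  constructor
  · intro h
    rw [← h]
    exact List.drop_suffix _ _
  · rintro ⟨pre, rfl⟩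
    rw [show (pre ++ w).length - w.length = pre.length by simp]
    exact List.drop_left



theorem lps_le_length (w t : List Char) : lps w t ≤ t.length := by
  have h := (lps_spec w t).length_le
  have := lps_le w t
  simp only [List.length_take] at h
  omega

-- the failure function is the match length of the pattern prefix minus its head
theorem failFn_eq_lps_tail (w : List Char) (k : Nat) (hk1 : 1 ≤ k) (hkm : k ≤ w.length) :
    failFn w k = lps w ((w.take k).drop 1) := by
  have hlt : (w.take k).length = k := by simp; omega
  apply Nat.le_antisymm
  · have hp : failFn w k < k := failFn_lt w k (by omega)
    have hs : w.take (failFn w k) <:+ w.take k := failFn_suffix w k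
    have hlen : (w.take (failFn w k)).length ≤ ((w.take k).drop 1).length := by
      simp only [List.length_take, List.length_drop]
      omega
    exact le_lps w _ _ (by omega)
      (List.suffix_of_suffix_length_le hs ((w.take k).drop_suffix 1) hlen)
  · have hs : w.take (lps w ((w.take k).drop 1)) <:+ w.take k :=
      (lps_spec w _).trans ((w.take k).drop_suffix 1)
    have hlen : lps w ((w.take k).drop 1) ≤ k - 1 := by
      have := lps_le_length w ((w.take k).drop 1)
      simp only [List.length_drop] at this
      omega
    exact le_failFn w k _ (by omega) hs

-- the ported _step equals the reference transition whenever the consulted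
-- table entries are correct (fuel = k is then never exhausted)
theorem fbLoop_eq_delta (w : List Char) (tab : List Nat) :
    ∀ (fuel k : Nat) (c : Char), k ≤ fuel → (∀ j, j < k → tab[j]! = failFn w (j+1)) →
      fbLoop w tab fuel k c = delta w k c := by
  intro fuel
  induction fuel with
  | zero =>
    intro k c hk _
    have hk0 : k = 0 := by omega
    subst hk0
    rw [delta]
    simp [fbLoop]
  | succ fuel ih =>
    intro k c hk htab
    by_cases h : 0 < k ∧ w[k]? ≠ some c
    · have hfl : failFn w k < k := failFn_lt w k h.1
      have htabk : tab[k-1]! = failFn w k := by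
        have := htab (k-1) (by omega)
        rwa [show k - 1 + 1 = k by omega] at this
      rw [delta, dif_pos h]
      unfold fbLoop
      rw [if_pos h, htabk]
      exact ih (failFn w k) c (by omega) (fun j hj => htab j (by omega))
    · rw [delta, dif_neg h]
      unfold fbLoop
      rw [if_neg h]

theorem getbang_set_ne (l : List Nat) (q j v : Nat) (hj : j < l.length) (hne : j ≠ q) :
    (l.set q v)[j]! = l[j]! := by
  rw [getElem!_pos (l.set q v) j (by simpa using hj), getElem!_pos l j hj]
  exact List.getElem_set_ne (fun h => hne h.symm) _

theorem getbang_set_self (l : List Nat) (q v : Nat) (hq : q < l.length) :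
    (l.set q v)[q]! = v := by
  rw [getElem!_pos (l.set q v) q (by simpa using hq)]
  exact List.getElem_set_self (by simpa using hq)

-- proof-side name for buildFail's loop body
def bfStep (w : List Char) (st : List Nat × Nat) (q : Int) : List Nat × Nat :=
  let k := fbLoop w st.1 st.2 st.2 (PySem.List.pyGetD w q ' ')
  (PySem.List.pySetD st.1 q k, k)

theorem buildFail_aux (w : List Char) :
    ∀ q : Nat, 1 ≤ q → q ≤ w.length →
      (let st := (PySem.List.pyRange 1 (q : Int) 1).foldl (bfStep w) (List.replicate w.length 0, 0)
       st.1.length = w.length ∧ (∀ j, j < q → st.1[j]! = failFn w (j+1)) ∧ st.2 = failFn w q) := by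
  intro q
  induction q with
  | zero => omega
  | succ q ih =>
    intro _ hqm
    rcases Nat.eq_zero_or_pos q with hq0 | hq1
    · subst hq0
      have h11 : PySem.List.pyRange 1 ((1:Nat) : Int) 1 = [] := by
        simp [PySem.List.pyRange]
      have hf1 : failFn w 1 = 0 := by
        have := failFn_lt w 1 (by omega)
        omega
      refine ⟨by rw [h11]; simp, ?_, by rw [h11]; simp [hf1]⟩
      intro j hj
      have hj0 : j = 0 := by omega
      subst hj0
      rw [h11]
      simp only [List.foldl_nil]
      rw [hf1, getElem!_pos _ _ (by simp; omega)]
      simp [List.getElem_replicate]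
    · have hqm' : q ≤ w.length := by omega
      have hqlt : q < w.length := by omega
      obtain ⟨hlen, htab, hk⟩ := ih hq1 hqm'
      have hsplit : PySem.List.pyRange 1 ((q+1 : Nat) : Int) 1
          = PySem.List.pyRange 1 (q : Int) 1 ++ [(q : Int)] := by
        rw [show ((q+1 : Nat) : Int) = (q : Int) + 1 by push_cast; ring]
        exact PySem.List.pyRange_one_succ_right (by omega)
      rw [hsplit, List.foldl_append]
      set st := (PySem.List.pyRange 1 (q : Int) 1).foldl (bfStep w) (List.replicate w.length 0, 0)
        with hst
      simp only [List.foldl_cons, List.foldl_nil]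
      unfold bfStep
      have hget : PySem.List.pyGetD w ((q : Nat) : Int) ' ' = w[q] := by
        rw [PySem.List.pyGetD_natCast]
        exact List.getD_eq_getElem w ' ' hqlt
      have hkfl : failFn w q < q := failFn_lt w q (by omega)
      have hnew : fbLoop w st.1 st.2 st.2 (PySem.List.pyGetD w ((q:Nat) : Int) ' ')
          = failFn w (q+1) := by
        rw [hget, fbLoop_eq_delta w st.1 st.2 st.2 w[q] (Nat.le_refl _)
          (fun j hj => htab j (by omega))]
        rw [hk]
        have hd := delta_eq_lps w (by intro h; subst h; simp at hqlt) w[q] (failFn w q)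
          (by omega) ((w.take q).drop 1) (failFn_eq_lps_tail w q hq1 hqm').symm
        rw [hd]
        have happ : (w.take q).drop 1 ++ [w[q]] = (w.take (q+1)).drop 1 := by
          rw [List.take_add_one, List.getElem?_eq_getElem hqlt]
          simp only [Option.toList_some]
          rw [List.drop_append_of_le_length (by simp; omega)]
        rw [happ, ← failFn_eq_lps_tail w (q+1) (by omega) (by omega)]
      constructor
      · simp only [PySem.List.pySetD_natCast]
        simpa using hlen
      constructor
      · intro j hj
        simp only [PySem.List.pySetD_natCast]
        rcases Nat.lt_or_ge j q with hjq | hjq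
        · rw [getbang_set_ne _ _ _ _ (by omega) (by omega)]
          exact htab j hjq
        · have hjq' : j = q := by omega
          subst hjq'
          rw [getbang_set_self _ _ _ (by omega)]
          exact hnew
      · exact hnew

theorem buildFail_correct (w : List Char) (hw : w ≠ []) :
    ∀ j, j < w.length → (buildFail w).1[j]! = failFn w (j+1) := by
  have hm : 1 ≤ w.length := by
    have := List.length_pos_iff.mpr hw
    omega
  obtain ⟨_, htab, _⟩ := buildFail_aux w w.length hm (Nat.le_refl _)
  exact htab

-- invariant of B's stack: each entry's state is the match length of its prefix, and < |w|
def StInv (w : List Char) (stB : List (Char × Nat)) : Prop :=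
  ∀ i (h : i < stB.length),
    (stB[i]).2 = lps w ((stB.take (i+1)).map Prod.fst) ∧ (stB[i]).2 < w.length

theorem stinv_step (w : List Char) (hw : w ≠ []) (tab : List Nat)
    (htab : ∀ j, j < w.length → tab[j]! = failFn w (j+1))
    (stB : List (Char × Nat)) (hInv : StInv w stB) (c : Char) :
    aStep w (w.length : Int) (stB.map Prod.fst) c = (bStep w tab stB c).map Prod.fst ∧
      StInv w (bStep w tab stB c) := by
  have hwpos : 0 < w.length := List.length_pos_iff.mpr hw
  -- the initial automaton state read off the stack
  have hk0 : (match stB.getLast? with | some x => x.2 | none => 0) = lps w (stB.map Prod.fst) ∧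
      (match stB.getLast? with | some x => x.2 | none => 0) < w.length := by
    cases hst : stB.getLast? with
    | none =>
      rw [List.getLast?_eq_none_iff] at hst
      subst hst
      simp [lps_nil w hw, hwpos]
    | some x =>
      have hne : stB ≠ [] := by
        intro h; subst h; simp at hst
      have hlen : stB.length - 1 < stB.length := by
        have := List.length_pos_iff.mpr hne; omega
      have hx : x = stB[stB.length - 1] := by
        rw [List.getLast?_eq_getElem?] at hst
        rw [List.getElem?_eq_getElem hlen] at hst
        exact (Option.some.inj hst).symm
      obtain ⟨h1, h2⟩ := hInv (stB.length - 1) hlen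
      subst hx
      rw [show stB.length - 1 + 1 = stB.length by omega, List.take_length] at h1
      exact ⟨h1, h2⟩
  have hdelta : fbLoop w tab (match stB.getLast? with | some x => x.2 | none => 0)
        (match stB.getLast? with | some x => x.2 | none => 0) c
      = lps w (stB.map Prod.fst ++ [c]) := by
    rw [fbLoop_eq_delta w tab _ _ c (Nat.le_refl _) (fun j hj => htab j (by omega))]
    exact delta_eq_lps w hw c _ hk0.2 _ hk0.1.symm
  unfold aStep bStep
  simp only [hdelta]
  set stA := stB.map Prod.fst with hstA
  set K := lps w (stA ++ [c]) with hK
  by_cases hcond : K = w.length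
  · have hsuf : w <:+ stA ++ [c] := (lps_eq_length_iff w _).mp hcond
    have hmle : w.length ≤ stA.length + 1 := by
      have := hsuf.length_le; simp at this; omega
    have hAc : PySem.List.slice (stA ++ [c]) (some (-(w.length : Int))) none = w :=
      (slice_cond_iff_suffix (stA ++ [c]) w hwpos).mpr hsuf
    rw [if_pos hAc, if_pos hcond]
    have hlenA : (stA ++ [c]).length = stB.length + 1 := by simp [hstA]
    constructor
    · rw [foldl_dropLast_pyRange, List.map_take, hlenA]
      rw [show stB.length + 1 - w.length = stB.length - (w.length - 1) by omega]
      rw [List.take_append]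
      simp [hstA]
    · intro i hi
      simp only [List.length_take] at hi
      have hi' : i < stB.length := by omega
      have hi1 : i + 1 ≤ stB.length - (w.length - 1) := by omega
      obtain ⟨h1, h2⟩ := hInv i hi'
      constructor
      · rw [List.getElem_take, List.take_take, Nat.min_eq_left hi1]
        exact h1
      · rw [List.getElem_take]
        exact h2
  · have hsuf : ¬ w <:+ stA ++ [c] := fun h => hcond ((lps_eq_length_iff w _).mpr h)
    have hAc : ¬ PySem.List.slice (stA ++ [c]) (some (-(w.length : Int))) none = w :=
      fun h => hsuf ((slice_cond_iff_suffix (stA ++ [c]) w hwpos).mp h)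
    rw [if_neg hAc, if_neg hcond]
    constructor
    · simp [hstA]
    · intro i hi
      simp only [List.length_append, List.length_cons, List.length_nil] at hi
      rcases Nat.lt_or_ge i stB.length with hi' | hi'
      · obtain ⟨h1, h2⟩ := hInv i hi'
        have hgl : (stB ++ [(c, K)])[i] = stB[i] := List.getElem_append_left hi'
        constructor
        · rw [hgl, List.take_append, show i + 1 - stB.length = 0 by omega]
          simpa using h1
        · rw [hgl]; exact h2
      · have hieq : i = stB.length := by omega
        subst hieq
        have hgl : (stB ++ [(c, K)])[stB.length] = (c, K) := by
          rw [List.getElem_append_right (Nat.le_refl _)]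
          simp
        constructor
        · rw [hgl, List.take_of_length_le (by simp)]
          simpa using hK
        · rw [hgl]
          have := lps_le w (stA ++ [c])
          rw [← hK] at this
          omega

theorem fold_stinv (w : List Char) (hw : w ≠ []) (tab : List Nat)
    (htab : ∀ j, j < w.length → tab[j]! = failFn w (j+1)) :
    ∀ (cs : List Char) (stB : List (Char × Nat)), StInv w stB →
      (cs.foldl (aStep w (w.length : Int)) (stB.map Prod.fst)
          = (cs.foldl (bStep w tab) stB).map Prod.fst) ∧ StInv w (cs.foldl (bStep w tab) stB) := by
  intro cs
  induction cs with
  | nil => intro stB h; exact ⟨rfl, h⟩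
  | cons c cs ih =>
    intro stB h
    obtain ⟨h1, h2⟩ := stinv_step w hw tab htab stB h c
    simp only [List.foldl_cons]
    rw [h1]
    exact ih (bStep w tab stB c) h2

theorem solution_eq_alt (o e : String) : solution o e = solution_alt o e := by
  have hlen : PySem.Str.len e = ((e.toList.length : Nat) : Int) := by
    simp [pysem]
  by_cases hw : e.toList = []
  · -- bomb_len = 0: A never pops; B returns the input unchanged
    have hfold : ∀ (cs st : List Char), cs.foldl (aStep [] 0) st = st ++ cs := by
      intro cs
      induction cs with
      | nil => simp
      | cons c cs ih =>
        intro st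
        have hstep : aStep [] 0 st c = st ++ [c] := by
          unfold aStep
          simp
        simp only [List.foldl_cons, hstep, ih, List.append_assoc, List.singleton_append]
    have hB : solution_alt o e = (if o.toList = [] then "FRULA" else o) := by
      unfold solution_alt
      rw [hw]
      simp [List.isEmpty_iff]
    have hA : solution o e = (if o.toList = [] then "FRULA" else String.ofList o.toList) := by
      unfold solution
      rw [hlen, hw]
      simp only [List.length_nil, Nat.cast_zero]
      rw [hfold, List.nil_append]
    rw [hA, hB]
    by_cases ho : o.toList = []
    · simp [ho]
    · rw [if_neg ho, if_neg ho]
      exact String.ofList_toList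
  · have hwlen : e.toList.length ≠ 0 := by simpa using hw
    unfold solution solution_alt
    rw [hlen, if_neg hwlen]
    obtain ⟨h1, h2⟩ := fold_stinv e.toList hw (buildFail e.toList).1 (buildFail_correct e.toList hw)
      o.toList [] (by intro i h; simp at h)
    simp only [List.map_nil] at h1
    rw [h1]
    by_cases hst : (o.toList.foldl (bStep e.toList (buildFail e.toList).1) []) = []
    · simp [hst]
    · rw [if_neg (by simpa using hst), if_neg hst]

theorem solution_spec : Claim_equal_solution := by
  intro o e _hdom
  unfold Spec_solution
  exact solution_eq_alt o e
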